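-- pv_equiv track=rewrite | github.com/Jeffrey-Sardina/TWIG-TWM-dev | src_old/utils.py | get_subj_obj_cofreqs
-- ===== SOURCE A (Python) =====
-- def get_subj_obj_cofreqs(triples):
--     '''
--     get_subj_obj_cofreqs() calculates the co-frequencies of every node-node pair in the given triples, irrespective of the predicate that connects them.
--
--     The arguments it acepts are:
--         - triples (list<tuple<int, int int>>): a list of all triples (using numeric IDs for their elements). In each row of this list, the integers represent, in order, the IDs of the subject, predicate, and object of a triple.
--
--     The values returned are:
--         - sorted_subj_obj_cofreqs (dict of tuple<int,int> -> int): A dict that maps a subject ID and an object ID to the number of times that (s, *, o) is observed in the given triples.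
--
--     NOTE: dicts are sorted by key as a standardisation and reproducibility measure.
--     '''
--     subj_obj_cofreqs = {}
--     for s, p, o in triples:
--         if not (s, o) in subj_obj_cofreqs:
--             subj_obj_cofreqs[(s, o)] = 0
--         subj_obj_cofreqs[(s, o)] += 1
--     sorted_subj_obj_cofreqs = dict(sorted(subj_obj_cofreqs.items()))
--     return sorted_subj_obj_cofreqs
-- ===== SOURCE B (Python) =====
-- def get_subj_obj_cofreqs(triples):
--     '''
--     Sort-then-group re-implementation: no pair-keyed hash counter is built;
--     the (s, o) pairs are sorted and counted by scanning runs of adjacent equal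
--     pairs, so the emitted dict is key-sorted by construction.
--     '''
--     pairs = sorted((s, o) for s, p, o in triples)
--     out = {}
--     i, n = 0, len(pairs)
--     while i < n:
--         j = i + 1
--         while j < n and pairs[j] == pairs[i]:
--             j += 1
--         out[pairs[i]] = j - i
--         i = j
--     return out
-- ===== Notes on version B (the rewrite author's own statement) =====
-- stated objective: alternative
-- what changed: Replaces hash-map counting followed by a final key-sort with sorting the (s,o) pair list first and counting by a single scan over runs of adjacent equal pairs, so no pair-keyed counter dict is ever built and the output dict is key-sorted by construction.
import Mathlib
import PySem

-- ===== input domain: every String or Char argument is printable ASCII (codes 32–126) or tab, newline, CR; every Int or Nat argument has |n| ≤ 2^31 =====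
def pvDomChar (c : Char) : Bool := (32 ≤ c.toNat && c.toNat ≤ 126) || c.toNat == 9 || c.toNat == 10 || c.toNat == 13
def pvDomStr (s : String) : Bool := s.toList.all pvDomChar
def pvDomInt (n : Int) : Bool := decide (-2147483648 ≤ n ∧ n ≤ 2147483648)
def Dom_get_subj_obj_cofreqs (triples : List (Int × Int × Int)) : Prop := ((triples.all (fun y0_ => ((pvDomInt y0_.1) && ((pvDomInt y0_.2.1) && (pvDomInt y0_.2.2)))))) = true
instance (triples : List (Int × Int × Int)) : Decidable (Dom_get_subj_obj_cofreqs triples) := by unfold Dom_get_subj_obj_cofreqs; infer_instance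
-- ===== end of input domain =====

-- B replaces A's hash-map counting + final key-sort by sort-then-group run-length
-- counting over adjacent equal (s,o) pairs (alternative decomposition, similar cost).
-- The returned dict is rendered as its item list (s, o, count).

-- ===== PORT A =====
def get_subj_obj_cofreqs (triples : List (Int × Int × Int)) : List (Int × Int × Int) :=
  let subj_obj_cofreqs : PySem.Dict (Int × Int) Int :=
    triples.foldl (fun d t =>
      let d := if d.contains (t.1, t.2.2) = false then d.insert (t.1, t.2.2) 0 else d
      -- d[(s,o)] += 1 : the key is present here, so get-then-overwrite is exact
      d.insert (t.1, t.2.2) (d.getD (t.1, t.2.2) 0 + 1)) PySem.Dict.empty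
  -- sorted(d.items()): dict keys are unique, so Python's tuple comparison never
  -- reaches the value; sorting by the two key components is exact
  (PySem.List.sorted2 subj_obj_cofreqs.items (fun p => p.1.1) (fun p => p.1.2)).map
    (fun p => (p.1.1, p.1.2, p.2))

-- ===== PORT B =====
-- the run-length scan over the sorted pair list (Source B's while loops)
def pvRle : List (Int × Int) → List (Int × Int × Int)
  | [] => []
  | x :: rest =>
    (x.1, x.2, (1 + (rest.takeWhile (fun y => y == x)).length : Int)) ::
      pvRle (rest.dropWhile (fun y => y == x))
termination_by l => l.length
decreasing_by
  simp only [List.length_cons]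
  exact Nat.lt_succ_of_le (List.length_dropWhile_le _ _)

def get_subj_obj_cofreqs_alt (triples : List (Int × Int × Int)) : List (Int × Int × Int) :=
  pvRle (PySem.List.sorted2 (triples.map (fun t => (t.1, t.2.2))) (fun p => p.1) (fun p => p.2))

-- ===== PRECONDITION & SPEC =====
def Spec_get_subj_obj_cofreqs (triples : List (Int × Int × Int)) (out : List (Int × Int × Int)) : Prop := out = get_subj_obj_cofreqs_alt triples
instance (triples : List (Int × Int × Int)) (out : List (Int × Int × Int)) : Decidable (Spec_get_subj_obj_cofreqs triples out) := by unfold Spec_get_subj_obj_cofreqs; infer_instance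

-- ===== CLAIM (what is proved, stated in full; the proofs are below) =====
def Claim_equal_get_subj_obj_cofreqs : Prop := ∀ (triples : List (Int × Int × Int)), Dom_get_subj_obj_cofreqs triples → Spec_get_subj_obj_cofreqs triples (get_subj_obj_cofreqs triples)

-- ===== LEMMAS AND PROOFS =====

-- sorted2 with two Int keys is sorted by the lexicographic key
theorem pv_sorted2_eq_sorted_lex {α : Type} (xs : List α) (k1 k2 : α → Int) :
    PySem.List.sorted2 xs k1 k2 = PySem.List.sorted xs (fun a => (toLex (k1 a, k2 a) : Int ×ₗ Int)) := by
  have hcmp : (fun a b : α => decide (k1 a < k1 b) || (!decide (k1 b < k1 a) && decide (k2 a < k2 b)))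
      = fun a b : α => decide ((toLex (k1 a, k2 a) : Int ×ₗ Int) < toLex (k1 b, k2 b)) := by
    funext a b
    rcases lt_trichotomy (k1 a) (k1 b) with h | h | h <;>
      simp [Prod.Lex.toLex_lt_toLex, h]
    omega
  unfold PySem.List.sorted2 PySem.List.sorted
  simp only [if_neg (by decide : ¬ (false = true))]
  rw [hcmp]

-- A's loop body collapses to the counter step
theorem pv_step_eq (d : PySem.Dict (Int × Int) Int) (k : Int × Int) :
    (let d1 := if d.contains k = false then d.insert k 0 else d
     d1.insert k (d1.getD k 0 + 1)) = d.insert k (d.getD k 0 + 1) := by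
  by_cases h : d.contains k = false
  · simp only [h, if_pos, PySem.Dict.getD_insert_self, PySem.Dict.insert_insert_self,
      PySem.Dict.getD_of_not_contains d 0 h]
  · simp [h]

theorem pv_ofList_sublist {α : Type} [BEq α] [LawfulBEq α] (xs : List α) :
    (PySem.Set.ofList xs).Sublist xs := by
  induction xs with
  | nil => simp [PySem.Set.ofList]
  | cons x xs ih =>
    rw [PySem.Set.ofList_cons]
    exact List.Sublist.cons₂ x (List.filter_sublist.trans ih)

theorem pv_discard_run {α : Type} [BEq α] [LawfulBEq α] (x : α) (run rest' : List α)
    (hall : ∀ y ∈ run, y = x) (hx : x ∉ rest') :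
    (PySem.Set.ofList (run ++ rest')).discard x = PySem.Set.ofList rest' := by
  induction run with
  | nil =>
    simp only [List.nil_append]
    exact List.filter_eq_self.mpr (fun y hy => by
      simp only [Bool.not_eq_eq_eq_not, Bool.not_true, beq_eq_false_iff_ne, ne_eq]
      exact fun hyx => hx (hyx ▸ (PySem.Set.mem_ofList _ _).mp hy))
  | cons z run' ih =>
    have hz : z = x := hall z (List.mem_cons_self)
    subst hz
    rw [List.cons_append, PySem.Set.ofList_cons]
    have h1 : ∀ (s : List α), (PySem.Set.discard (z :: s) z) = PySem.Set.discard s z := by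
      intro s; simp [PySem.Set.discard]
    have h2 : ∀ (s : List α), PySem.Set.discard (PySem.Set.discard s z) z = PySem.Set.discard s z := by
      intro s; simp [PySem.Set.discard, List.filter_filter]
    rw [h1, h2]
    exact ih (fun y hy => hall y (List.mem_cons_of_mem _ hy))

-- run-length scan of a lex-sorted pair list = (first-occurrence dedup, with counts)
theorem pv_rle_eq (l : List (Int × Int))
    (h : l.Pairwise (fun a b => (toLex a : Int ×ₗ Int) ≤ toLex b)) :
    pvRle l = (PySem.Set.ofList l).map (fun k => (k.1, k.2, (l.count k : Int))) := by
  induction l using pvRle.induct with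
  | case1 => simp [pvRle]
  | case2 x rest ih =>
    have hrest : rest.Pairwise (fun a b => (toLex a : Int ×ₗ Int) ≤ toLex b) :=
      (List.pairwise_cons.mp h).2
    have hxle : ∀ y ∈ rest, (toLex x : Int ×ₗ Int) ≤ toLex y := (List.pairwise_cons.mp h).1
    set run := rest.takeWhile (fun y => y == x) with hrun
    set rest' := rest.dropWhile (fun y => y == x) with hrest'
    have hsplit : run ++ rest' = rest := List.takeWhile_append_dropWhile
    have hall : ∀ y ∈ run, y = x := by
      intro y hy
      have hy' := List.mem_takeWhile_imp (p := fun y => y == x) (l := rest) (x := y) (hrun ▸ hy)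
      exact beq_iff_eq.mp hy'
    have hsub : rest'.Sublist rest := List.dropWhile_sublist _
    have hrest'p : rest'.Pairwise (fun a b => (toLex a : Int ×ₗ Int) ≤ toLex b) :=
      hrest.sublist hsub
    have hx : x ∉ rest' := by
      intro hmem
      have hne : rest' ≠ [] := List.ne_nil_of_mem hmem
      have hhd : ((rest'.head hne) == x) = false := by
        have := List.head_dropWhile_not (fun y => y == x) (l := rest) (by rw [← hrest']; exact hne)
        simpa [← hrest'] using this
      obtain ⟨hd, tl, hre⟩ := List.exists_cons_of_ne_nil hne
      have hhdne : hd ≠ x := by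
        have : rest'.head hne = hd := by simp [hre]
        simpa [this] using hhd
      rcases List.mem_cons.mp (hre ▸ hmem) with heq | hmem'
      · exact hhdne heq.symm
      · have h1 : (toLex hd : Int ×ₗ Int) ≤ toLex x :=
          (List.pairwise_cons.mp (hre ▸ hrest'p)).1 x hmem'
        have h2 : (toLex x : Int ×ₗ Int) ≤ toLex hd :=
          hxle hd ((hre ▸ hsub).mem List.mem_cons_self)
        exact hhdne (toLex.injective (le_antisymm h1 h2))
    have hof : PySem.Set.ofList (x :: rest) = x :: PySem.Set.ofList rest' := by
      rw [PySem.Set.ofList_cons, ← hsplit, pv_discard_run x run rest' hall hx]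
    have hcx : (x :: rest).count x = run.length + 1 := by
      rw [List.count_cons_self, ← hsplit, List.count_append]
      have h1 : run.count x = run.length :=
        List.count_eq_length.mpr (fun b hb => (hall b hb).symm)
      have h2 : rest'.count x = 0 := List.count_eq_zero.mpr hx
      omega
    have hck : ∀ k ∈ PySem.Set.ofList rest', (x :: rest).count k = rest'.count k := by
      intro k hk
      have hkmem : k ∈ rest' := (PySem.Set.mem_ofList _ _).mp hk
      have hkne : k ≠ x := fun hkx => hx (hkx ▸ hkmem)
      rw [List.count_cons_of_ne hkne.symm, ← hsplit, List.count_append]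
      have : run.count k = 0 := List.count_eq_zero.mpr (fun hkr => hkne (hall k hkr))
      omega
    rw [pvRle, hof, List.map_cons, ih hrest'p]
    congr 1
    · rw [← hrun, hcx]
      push_cast
      ring_nf
    · exact (List.map_congr_left (fun k hk => by rw [hck k hk])).symm

theorem pv_main (triples : List (Int × Int × Int)) :
    get_subj_obj_cofreqs triples = get_subj_obj_cofreqs_alt triples := by
  unfold get_subj_obj_cofreqs get_subj_obj_cofreqs_alt
  have hbody : (fun (d : PySem.Dict (Int × Int) Int) (t : Int × Int × Int) =>
      let d := if d.contains (t.1, t.2.2) = false then d.insert (t.1, t.2.2) 0 else d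
      d.insert (t.1, t.2.2) (d.getD (t.1, t.2.2) 0 + 1))
      = fun d t => d.insert (t.1, t.2.2) (d.getD (t.1, t.2.2) 0 + 1) := by
    funext d t; exact pv_step_eq d (t.1, t.2.2)
  set ps := triples.map (fun t => (t.1, t.2.2)) with hps
  have hfold : triples.foldl
      (fun d t => d.insert (t.1, t.2.2) (d.getD (t.1, t.2.2) 0 + 1)) PySem.Dict.empty
      = PySem.Dict.counter ps := by
    rw [← PySem.Dict.foldl_insert_getD_add_one_eq_counter, hps, List.foldl_map]
  set L := fun a : Int × Int => (toLex a : Int ×ₗ Int) with hL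
  set S := PySem.List.sorted ps L with hSdef
  have hSperm : S.Perm ps := PySem.List.sorted_perm ps L false
  have hperm : (PySem.Set.ofList S).Perm (PySem.Set.ofList ps) := by
    rw [List.perm_ext_iff_of_nodup (PySem.Set.nodup_ofList S) (PySem.Set.nodup_ofList ps)]
    intro a
    rw [PySem.Set.mem_ofList, PySem.Set.mem_ofList]
    exact hSperm.mem_iff
  have hlt : (PySem.Set.ofList S).Pairwise (fun a b => L a < L b) := by
    have hle : (PySem.Set.ofList S).Pairwise (fun a b => L a ≤ L b) :=
      (PySem.List.sorted_pairwise ps L).sublist (pv_ofList_sublist S)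
    have hne : (PySem.Set.ofList S).Pairwise (fun a b => a ≠ b) := PySem.Set.nodup_ofList S
    exact (hle.and hne).imp (fun hab => lt_of_le_of_ne hab.1 (fun he => hab.2 (toLex.injective he)))
  simp only [hbody, hfold, PySem.Dict.items_counter]
  have hsortedA : PySem.List.sorted2
      ((PySem.Set.ofList ps).map (fun k => (k, (ps.count k : Int))))
      (fun p => p.1.1) (fun p => p.1.2)
      = (PySem.Set.ofList S).map (fun k => (k, (ps.count k : Int))) := by
    rw [pv_sorted2_eq_sorted_lex]
    exact PySem.List.sorted_eq_of_perm_of_pairwise_lt _ _ _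
      (hperm.map _) ((List.pairwise_map).mpr hlt)
  have hsortedB : PySem.List.sorted2 ps (fun p => p.1) (fun p => p.2) = S := by
    rw [pv_sorted2_eq_sorted_lex]
  rw [hsortedA, hsortedB, pv_rle_eq S (PySem.List.sorted_pairwise ps L), List.map_map]
  exact List.map_congr_left (fun k _ => by simp [hSperm.count_eq k])

-- ===== VERDICT (by name: the statement is the Claim_ definition above) =====
theorem get_subj_obj_cofreqs_spec : Claim_equal_get_subj_obj_cofreqs := by
  intro triples _
  exact pv_main triples
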